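-- pv_equiv track=rewrite | github.com/wndjs803/Algorithm | 프로그래머스/2/42626. 더 맵게/더 맵게.py | solution
-- ===== SOURCE A (Python) =====
-- import heapq
--
-- def solution(scoville, K):
--     heapq.heapify(scoville)
--     count = 0
--     while True:
--         if scoville[0] < K:
--             if len(scoville) >= 2:
--                 first = heapq.heappop(scoville)
--                 second = heapq.heappop(scoville)
--                 new_value = first + second*2
--                 heapq.heappush(scoville, new_value)
--                 count += 1
--             else: return -1
--         else: return count
--
--     return count
-- ===== SOURCE B (Python) =====
-- def solution(scoville, K):
--     # Sorted-list strategy: sort once, keep the working list fully sorted,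
--     # repeatedly take the two smallest from the front and insert the mix
--     # back at its ordered position by a scan.  Return value only: unlike A,
--     # the input list is not mutated.
--     s = sorted(scoville)
--     count = 0
--     while s[0] < K:
--         if len(s) < 2:
--             return -1
--         v = s[0] + 2 * s[1]
--         rest = s[2:]
--         i = 0
--         while i < len(rest) and rest[i] <= v:
--             i += 1
--         rest.insert(i, v)
--         s = rest
--         count += 1
--     return count
-- ===== Notes on version B (the rewrite author's own statement) =====
-- stated objective: alternative
-- what changed: Replaces the heapq binary min-heap with a list sorted once up front and kept sorted: each step pops the two smallest from the front and re-inserts the mix at its ordered position by a scan; the input list is no longer mutated (return value unchanged).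
import Mathlib
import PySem

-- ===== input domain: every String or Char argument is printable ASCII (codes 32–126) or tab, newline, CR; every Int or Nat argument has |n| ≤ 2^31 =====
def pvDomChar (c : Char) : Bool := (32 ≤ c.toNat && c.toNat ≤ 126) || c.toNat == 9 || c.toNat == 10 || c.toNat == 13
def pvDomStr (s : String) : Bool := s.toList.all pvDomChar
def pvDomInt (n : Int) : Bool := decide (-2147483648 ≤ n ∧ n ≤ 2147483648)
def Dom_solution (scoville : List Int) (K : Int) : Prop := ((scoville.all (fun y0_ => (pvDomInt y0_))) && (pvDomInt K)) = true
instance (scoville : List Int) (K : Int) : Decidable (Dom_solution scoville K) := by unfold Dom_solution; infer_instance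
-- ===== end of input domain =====

-- B replaces A's heapq min-heap by a once-sorted list with ordered re-insertion (alternative
-- data structure, similar cost); equivalence is about the RETURN value only — A mutates its
-- argument into heap-array order, B leaves it unchanged.

-- ===== PORT A =====
-- A's heapq.* calls are C standard-library calls; they are ported as contract-equivalent
-- min-priority-queue operations on a List (front element = the minimum): exact at solution's
-- observable return value (the heap's internal array layout never reaches the return value).

-- bring the minimum of the list to the front (heapify contract / restoring the heap after a pop)
def liftMin : List Int → List Int
  | [] => []
  | x :: t =>
    match liftMin t with
    | [] => [x]
    | m :: r => if x ≤ m then x :: m :: r else m :: x :: r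

-- heappop contract on a front-min list: return the minimum and the re-established heap
def popMin : List Int → Int × List Int
  | [] => (0, [])            -- unreachable: Python heappop raises IndexError on []
  | x :: t => (x, liftMin t)

-- heappush contract on a front-min list
def heapPush (h : List Int) (v : Int) : List Int :=
  match h with
  | [] => [v]
  | x :: t => if v ≤ x then v :: x :: t else x :: v :: t

theorem length_liftMin (l : List Int) : (liftMin l).length = l.length := by
  induction l with
  | nil => rfl
  | cons x t ih =>
    simp only [liftMin]
    cases h : liftMin t with
    | nil => rw [h] at ih; simp [← ih]
    | cons m r =>
      rw [h] at ih
      by_cases hx : x ≤ m <;> simp [hx, ← ih]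

theorem length_popMin_snd (l : List Int) : (popMin l).2.length = l.length - 1 := by
  cases l <;> simp [popMin, length_liftMin]

theorem length_heapPush (h : List Int) (v : Int) : (heapPush h v).length = h.length + 1 := by
  cases h with
  | nil => rfl
  | cons x t => by_cases hv : v ≤ x <;> simp [heapPush, hv]

-- the `while True` loop of A; [] is unreachable under Pre_ (Python raises IndexError there).
-- first = x (the heap front), second = (popMin (liftMin t)).1, exactly the two heappop calls.
def solutionGo (K : Int) : List Int → Int → Int
  | [], _ => -1
  | [x], count => if x < K then -1 else count          -- scoville[0] < K and len < 2
  | x :: u :: t', count =>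
    if x < K then
      solutionGo K
        (heapPush (popMin (liftMin (u :: t'))).2 (x + (popMin (liftMin (u :: t'))).1 * 2))
        (count + 1)
    else count
termination_by h _ => h.length
decreasing_by
  simp [length_heapPush, length_popMin_snd, length_liftMin]

def solution (scoville : List Int) (K : Int) : Int :=
  solutionGo K (liftMin scoville) 0   -- heapq.heapify

-- ===== PORT B =====

-- the inner scan of Source B: insert v after all elements ≤ v in a sorted list
def insort : List Int → Int → List Int
  | [], v => [v]
  | x :: t, v => if x ≤ v then x :: insort t v else v :: x :: t

theorem length_insort (l : List Int) (v : Int) : (insort l v).length = l.length + 1 := by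
  induction l with
  | nil => rfl
  | cons x t ih => by_cases hx : x ≤ v <;> simp [insort, hx, ih]

-- the while loop of Source B; [] is unreachable under Pre_ (Python raises IndexError there)
def solutionAltGo (K : Int) : List Int → Int → Int
  | [], _ => -1
  | [x], count => if x < K then -1 else count          -- s[0] < K and len(s) < 2
  | x :: y :: r, count =>
    if x < K then solutionAltGo K (insort r (x + 2 * y)) (count + 1) else count
termination_by s _ => s.length
decreasing_by
  simp [length_insort]

def solution_alt (scoville : List Int) (K : Int) : Int :=
  solutionAltGo K (PySem.List.sorted scoville (fun x => x) false) 0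

-- ===== PRECONDITION & SPEC =====
-- Pre_ excludes only the empty list, on which Python A raises IndexError (scoville[0]).
def Pre_solution (scoville : List Int) (K : Int) : Prop := scoville ≠ []
instance (scoville : List Int) (K : Int) : Decidable (Pre_solution scoville K) := by
  unfold Pre_solution; infer_instance
def pvWitness_solution : List Int × Int := ([1, 2, 3, 9, 10, 12], 7)

def Spec_solution (scoville : List Int) (K : Int) (out : Int) : Prop := out = solution_alt scoville K
instance (scoville : List Int) (K : Int) (out : Int) : Decidable (Spec_solution scoville K out) := by
  unfold Spec_solution; infer_instance

-- ===== CLAIM (what is proved, stated in full; the proofs are below) =====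
def Claim_equal_solution : Prop := ∀ (scoville : List Int) (K : Int), Dom_solution scoville K → Pre_solution scoville K → Spec_solution scoville K (solution scoville K)

-- ===== LEMMAS AND PROOFS =====

-- "the head, if any, is a minimum of the list"
def HeadMin (l : List Int) : Prop := ∀ m, l.head? = some m → ∀ x ∈ l, m ≤ x

theorem liftMin_perm (l : List Int) : (liftMin l).Perm l := by
  induction l with
  | nil => rfl
  | cons x t ih =>
    simp only [liftMin]
    cases h : liftMin t with
    | nil =>
      rw [h] at ih
      obtain rfl : t = [] := List.perm_nil.mp ih.symm
      exact List.Perm.refl _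
    | cons m r =>
      rw [h] at ih
      by_cases hx : x ≤ m
      · simp only [if_pos hx]; exact ih.cons x
      · simp only [if_neg hx]
        exact (List.Perm.swap x m r).trans (ih.cons x)

theorem liftMin_headMin (l : List Int) : HeadMin (liftMin l) := by
  induction l with
  | nil => intro m hm x hx; simp [liftMin] at hm
  | cons x t ih =>
    simp only [liftMin]
    cases h : liftMin t with
    | nil =>
      intro m hm y hy
      simp only [List.head?_cons, Option.some.injEq] at hm
      simp only [List.mem_singleton] at hy
      omega
    | cons m r =>
      rw [h] at ih
      have hmr : ∀ y ∈ m :: r, m ≤ y := ih m rfl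
      by_cases hx : x ≤ m
      · simp only [if_pos hx]
        intro m' hm' y hy
        simp only [List.head?_cons, Option.some.injEq] at hm'
        subst hm'
        rcases List.mem_cons.mp hy with rfl | hy2
        · exact le_refl _
        · exact le_trans hx (hmr y hy2)
      · simp only [if_neg hx]
        intro m' hm' y hy
        simp only [List.head?_cons, Option.some.injEq] at hm'
        subst hm'
        rcases List.mem_cons.mp hy with rfl | hy2
        · exact le_refl _
        · rcases List.mem_cons.mp hy2 with rfl | hy3
          · omega
          · exact hmr y (List.mem_cons_of_mem m hy3)

theorem heapPush_perm (h : List Int) (v : Int) : (heapPush h v).Perm (v :: h) := by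
  cases h with
  | nil => rfl
  | cons x t =>
    by_cases hv : v ≤ x
    · simp [heapPush, hv]
    · simp only [heapPush, if_neg hv]
      exact List.Perm.swap v x t

theorem heapPush_headMin (h : List Int) (v : Int) (hh : HeadMin h) : HeadMin (heapPush h v) := by
  cases h with
  | nil =>
    intro m hm y hy
    simp only [heapPush, List.head?_cons, Option.some.injEq] at hm
    simp only [heapPush, List.mem_singleton] at hy
    omega
  | cons x t =>
    have hx : ∀ y ∈ x :: t, x ≤ y := fun y hy => hh x rfl y hy
    by_cases hv : v ≤ x
    · simp only [heapPush, if_pos hv]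
      intro m hm y hy
      simp only [List.head?_cons, Option.some.injEq] at hm
      subst hm
      rcases List.mem_cons.mp hy with rfl | hy2
      · exact le_refl _
      · exact le_trans hv (hx y hy2)
    · simp only [heapPush, if_neg hv]
      intro m hm y hy
      simp only [List.head?_cons, Option.some.injEq] at hm
      subst hm
      rcases List.mem_cons.mp hy with rfl | hy2
      · exact le_refl _
      · rcases List.mem_cons.mp hy2 with rfl | hy3
        · omega
        · exact hx y (List.mem_cons_of_mem x hy3)

theorem insort_perm (l : List Int) (v : Int) : (insort l v).Perm (v :: l) := by
  induction l with
  | nil => rfl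
  | cons x t ih =>
    by_cases hx : x ≤ v
    · simp only [insort, if_pos hx]
      exact (ih.cons x).trans (List.Perm.swap v x t)
    · simp [insort, hx]

theorem insort_sorted (l : List Int) (v : Int) (hl : l.Pairwise (· ≤ ·)) :
    (insort l v).Pairwise (· ≤ ·) := by
  induction l with
  | nil => simp [insort]
  | cons x t ih =>
    rcases List.pairwise_cons.mp hl with ⟨hx, ht⟩
    by_cases hxv : x ≤ v
    · simp only [insort, if_pos hxv]
      refine List.pairwise_cons.mpr ⟨?_, ih ht⟩
      intro y hy
      have hy' : y ∈ v :: t := (insort_perm t v).subset hy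
      rcases List.mem_cons.mp hy' with rfl | hy2
      · exact hxv
      · exact hx y hy2
    · simp only [insort, if_neg hxv]
      refine List.pairwise_cons.mpr ⟨?_, hl⟩
      intro y hy
      rcases List.mem_cons.mp hy with rfl | hy2
      · omega
      · have := hx y hy2; omega

-- two front-minima of permuted lists coincide
theorem head_eq_of_perm {x y : Int} {t r : List Int}
    (hp : (x :: t).Perm (y :: r))
    (hx : ∀ z ∈ x :: t, x ≤ z) (hy : ∀ z ∈ y :: r, y ≤ z) : x = y := by
  have h1 : x ≤ y := hx y (hp.symm.subset (by simp))
  have h2 : y ≤ x := hy x (hp.subset (by simp))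
  omega

-- the coupled loop invariant: same multiset, B's list sorted, A's heap front-min
theorem go_eq (K : Int) : ∀ (n : Nat) (h s : List Int) (c : Int), s.length = n →
    h.Perm s → s.Pairwise (· ≤ ·) → HeadMin h →
    solutionGo K h c = solutionAltGo K s c := by
  intro n
  induction n with
  | zero =>
    intro h s c hlen hp _ _
    cases s with
    | cons y r => simp at hlen
    | nil =>
      obtain rfl : h = [] := List.perm_nil.mp hp
      simp [solutionGo, solutionAltGo]
  | succ n ih =>
    intro h s c hlen hp hsort hmin
    cases s with
    | nil => simp at hlen
    | cons y r =>
      cases h with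
      | nil => exact absurd (List.perm_nil.mp hp.symm) (by simp)
      | cons x t =>
        have hxall : ∀ z ∈ x :: t, x ≤ z := fun z hz => hmin x rfl z hz
        have hyall : ∀ z ∈ y :: r, y ≤ z := by
          intro z hz
          rcases List.mem_cons.mp hz with rfl | hz2
          · exact le_refl _
          · exact List.rel_of_pairwise_cons hsort hz2
        have hxy : x = y := head_eq_of_perm hp hxall hyall
        subst hxy
        have htr : t.Perm r := hp.cons_inv
        by_cases hK : x < K
        · cases r with
          | nil =>
            obtain rfl : t = [] := List.perm_nil.mp htr
            simp [solutionGo, solutionAltGo, hK]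
          | cons b r' =>
            cases t with
            | nil => exact absurd (List.perm_nil.mp htr.symm) (by simp)
            | cons u t' =>
              simp only [solutionGo, solutionAltGo, if_pos hK]
              cases hlt : liftMin (u :: t') with
              | nil =>
                have := length_liftMin (u :: t')
                rw [hlt] at this
                simp at this
              | cons second u' =>
                have hltp : (second :: u').Perm (b :: r') :=
                  (hlt ▸ liftMin_perm (u :: t')).trans htr
                have hsmin : ∀ z ∈ second :: u', second ≤ z := by
                  have := liftMin_headMin (u :: t')
                  rw [hlt] at this
                  exact this second rfl
                have hbmin : ∀ z ∈ b :: r', b ≤ z := by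
                  intro z hz
                  rcases List.mem_cons.mp hz with rfl | hz2
                  · exact le_refl _
                  · exact List.rel_of_pairwise_cons (List.pairwise_cons.mp hsort).2 hz2
                have hsb : second = b := head_eq_of_perm hltp hsmin hbmin
                subst hsb
                have hur : u'.Perm r' := hltp.cons_inv
                simp only [popMin]
                rw [show x + 2 * second = x + second * 2 from by ring]
                apply ih
                · have := length_insort r' (x + second * 2)
                  simp at hlen ⊢
                  omega
                · refine (heapPush_perm _ _).trans ?_
                  refine List.Perm.trans ?_ (insort_perm r' (x + second * 2)).symm
                  exact ((liftMin_perm u').trans hur).cons _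
                · exact insort_sorted r' _
                    (List.pairwise_cons.mp (List.pairwise_cons.mp hsort).2).2
                · exact heapPush_headMin _ _ (liftMin_headMin u')
        · cases r with
          | nil =>
            obtain rfl : t = [] := List.perm_nil.mp htr
            simp [solutionGo, solutionAltGo, hK]
          | cons b r' =>
            cases t with
            | nil => exact absurd (List.perm_nil.mp htr.symm) (by simp)
            | cons u t' => simp [solutionGo, solutionAltGo, hK]

-- ===== VERDICT (by name: the statement is the Claim_ definition above) =====
theorem solution_spec : Claim_equal_solution := by
  intro scoville K _ _
  unfold Spec_solution solution solution_alt
  apply go_eq K (PySem.List.sorted scoville (fun x => x) false).length _ _ 0 rfl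
  · exact (liftMin_perm scoville).trans (PySem.List.sorted_perm ..).symm
  · simpa using PySem.List.sorted_pairwise (xs := scoville) (key := fun x => x)
  · exact liftMin_headMin scoville
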